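-- pv_equiv track=rewrite | github.com/gaurav-gandhi-2411/agentic-shopping-assistant | api/main.py | _apply_update
-- ===== SOURCE A (Python) =====
-- def _apply_update(state: dict, update: dict) -> dict:
--     """Merge a LangGraph node update into the accumulated state."""
--     result = dict(state)
--     for key, val in update.items():
--         if key == "messages":                     # Annotated[list, operator.add]
--             result[key] = state.get(key, []) + val
--         else:
--             result[key] = val
--     return result
-- ===== SOURCE B (Python) =====
-- def _apply_update(state: dict, update: dict) -> dict:
--     """Merge a LangGraph node update into the accumulated state."""
--     keys = list(state) + [k for k in update if k not in state]
--
--     def value(k):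
--         if k not in update:
--             return state[k]
--         if k == "messages":
--             return state.get(k, []) + update[k]
--         return update[k]
--
--     return {k: value(k) for k in keys}
-- ===== Notes on version B (the rewrite author's own statement) =====
-- stated objective: alternative
-- what changed: Instead of A's stateful loop that mutates a copied dict per update entry, B first computes the final key order (state keys, then update-only keys) and then builds the result in one comprehension from a pure per-key value function; no dict is ever mutated.
import Mathlib
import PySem

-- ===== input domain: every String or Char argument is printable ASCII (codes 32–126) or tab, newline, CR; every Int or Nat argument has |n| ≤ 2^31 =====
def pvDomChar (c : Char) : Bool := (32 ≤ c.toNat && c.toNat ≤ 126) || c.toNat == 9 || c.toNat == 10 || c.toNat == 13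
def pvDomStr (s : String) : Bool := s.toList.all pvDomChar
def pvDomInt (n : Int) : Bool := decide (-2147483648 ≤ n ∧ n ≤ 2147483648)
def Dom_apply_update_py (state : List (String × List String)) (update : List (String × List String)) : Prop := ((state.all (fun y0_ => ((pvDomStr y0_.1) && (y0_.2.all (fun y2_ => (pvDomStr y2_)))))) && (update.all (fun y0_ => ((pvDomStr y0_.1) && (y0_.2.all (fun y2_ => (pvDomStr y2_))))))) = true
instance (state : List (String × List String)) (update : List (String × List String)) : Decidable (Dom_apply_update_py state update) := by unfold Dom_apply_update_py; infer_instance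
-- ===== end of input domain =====

-- B replaces A's stateful loop (mutating a copied dict entry by entry) by first computing the
-- final key order and then building the result in one comprehension from a pure per-key value
-- function (alternative decomposition; same cost).

-- ===== PORT A =====
-- loop body of A: for key, val in update.items(): if key == "messages": result[key] = state.get(key, []) + val else: result[key] = val
def pvStepA (st : PySem.Dict String (List String)) (r : PySem.Dict String (List String))
    (kv : String × List String) : PySem.Dict String (List String) :=
  if kv.1 == "messages" then r.insert kv.1 (st.getD kv.1 [] ++ kv.2)
  else r.insert kv.1 kv.2

def apply_update_py (state : List (String × List String)) (update : List (String × List String)) : List (String × List String) :=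
  let st := PySem.Dict.ofList state
  let result := (PySem.Dict.ofList update).items.foldl (pvStepA st) st   -- result = dict(state); then the for-loop
  result.items

-- ===== PORT B =====
-- def value(k): if k not in update: return state[k]; if k == "messages": return state.get(k, []) + update[k]; return update[k]
-- (the state[k] / update[k] subscripts are guarded — k comes from state's keys resp. passed the 'in update' test — so getD's default branch is dead)
def pvValB (st u : PySem.Dict String (List String)) (k : String) : List String :=
  if !(u.contains k) then st.getD k []
  else if k == "messages" then st.getD k [] ++ u.getD k []
  else u.getD k []

def apply_update_py_alt (state : List (String × List String)) (update : List (String × List String)) : List (String × List String) :=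
  let st := PySem.Dict.ofList state
  let u := PySem.Dict.ofList update
  let keys := st.keys ++ u.keys.filter (fun k => !(st.contains k))   -- keys = list(state) + [k for k in update if k not in state]
  keys.map (fun k => (k, pvValB st u k))                             -- {k: value(k) for k in keys}

-- ===== PRECONDITION & SPEC =====
def Spec_apply_update_py (state : List (String × List String)) (update : List (String × List String)) (out : List (String × List String)) : Prop := out = apply_update_py_alt state update
instance (state : List (String × List String)) (update : List (String × List String)) (out : List (String × List String)) : Decidable (Spec_apply_update_py state update out) := by unfold Spec_apply_update_py; infer_instance

-- ===== CLAIM (what is proved, stated in full; the proofs are below) =====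
def Claim_equal_apply_update_py : Prop := ∀ (state : List (String × List String)) (update : List (String × List String)), Dom_apply_update_py state update → Spec_apply_update_py state update (apply_update_py state update)

-- ===== LEMMAS AND PROOFS =====

-- the value an entry p of the base dict ends up with after folding A's loop over l
def pvPick (st : PySem.Dict String (List String)) (l : List (String × List String))
    (p : String × List String) : List String :=
  match l.find? (fun q => q.1 == p.1) with
  | some q => if p.1 == "messages" then st.getD p.1 [] ++ q.2 else q.2
  | none => p.2

-- the value A's loop writes for a fresh key q of the update
def pvNew (st : PySem.Dict String (List String)) (q : String × List String) : List String :=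
  if q.1 == "messages" then st.getD q.1 [] ++ q.2 else q.2

theorem pv_pick_skip (st : PySem.Dict String (List String)) (p' : String × List String)
    (r : List (String × List String)) (q : String × List String) (h : q.1 ≠ p'.1) :
    pvPick st (p' :: r) q = pvPick st r q := by
  have hb : (p'.1 == q.1) = false := beq_eq_false_iff_ne.mpr (Ne.symm h)
  simp [pvPick, List.find?, hb]

theorem pv_pick_none (st : PySem.Dict String (List String)) (l : List (String × List String))
    (q : String × List String) (h : q.1 ∉ l.map Prod.fst) : pvPick st l q = q.2 := by
  have : l.find? (fun x => x.1 == q.1) = none := by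
    rw [List.find?_eq_none]
    intro x hx
    simp only [beq_iff_eq]
    intro he; exact h (he ▸ List.mem_map_of_mem hx)
  simp [pvPick, this]

-- MAIN INVARIANT: A's loop over l, started from d, yields d's entries rewritten by pvPick,
-- followed by the fresh entries of l in order
theorem pv_main (st d : PySem.Dict String (List String)) (l : List (String × List String))
    (hnd : (l.map Prod.fst).Nodup) (hd : d.keys.Nodup) :
    (l.foldl (pvStepA st) d).items =
      d.items.map (fun p => (p.1, pvPick st l p)) ++
      (l.filter (fun q => !(d.contains q.1))).map (fun q => (q.1, pvNew st q)) := by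
  induction l generalizing d with
  | nil => simp [pvPick]
  | cons p r ih =>
    simp only [List.map_cons, List.nodup_cons] at hnd
    obtain ⟨hp, hr⟩ := hnd
    have hstep : pvStepA st d p = d.insert p.1 (pvNew st p) := by
      by_cases h : p.1 = "messages" <;> simp [pvStepA, pvNew, h]
    have hnd' : (d.insert p.1 (pvNew st p)).keys.Nodup := PySem.Dict.nodup_keys_insert _ _ _ hd
    have hrne : ∀ q ∈ r, q.1 ≠ p.1 := by
      intro q hq he; exact hp (he ▸ List.mem_map_of_mem hq)
    have hfilr : (r.filter (fun q => !((d.insert p.1 (pvNew st p)).contains q.1))) =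
        (r.filter (fun q => !(d.contains q.1))) := by
      apply List.filter_congr
      intro q hq
      rw [PySem.Dict.contains_insert]
      simp [hrne q hq]
    simp only [List.foldl_cons, hstep, ih _ hr hnd', hfilr]
    by_cases hc : d.contains p.1 = true
    · rw [PySem.Dict.items_insert_of_contains _ _ hc]
      have hfill : ((p :: r).filter (fun q => !(d.contains q.1))) =
          (r.filter (fun q => !(d.contains q.1))) := by
        simp [hc]
      rw [hfill, List.map_map]
      congr 1
      apply List.map_congr_left
      intro q hq
      by_cases hqp : q.1 = p.1
      · have hb : (q.1 == p.1) = true := beq_iff_eq.mpr hqp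
        have h1 : pvPick st r (p.1, pvNew st p) = pvNew st p := pv_pick_none st r _ hp
        have h2 : pvPick st (p :: r) q = pvNew st p := by
          simp only [pvPick, List.find?, hqp, beq_self_eq_true]
          by_cases hm : p.1 = "messages" <;> simp [pvNew, hm]
        simp [h1, h2, hqp]
      · have hb : (q.1 == p.1) = false := beq_eq_false_iff_ne.mpr hqp
        simp only [Function.comp, hb]
        rw [pv_pick_skip st p r q hqp]
        simp
    · have hc' : d.contains p.1 = false := by simpa using hc
      rw [PySem.Dict.items_insert_of_not_contains _ _ hc']
      have hfill : ((p :: r).filter (fun q => !(d.contains q.1))) =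
          p :: (r.filter (fun q => !(d.contains q.1))) := by
        simp [hc']
      have hnotkey : ∀ q ∈ d.items, q.1 ≠ p.1 := by
        intro q hq he
        have hmk : d.contains q.1 = true :=
          (PySem.Dict.contains_iff_mem_keys d q.1).mpr (PySem.Dict.mem_keys_of_mem_items d hq)
        rw [he, hc'] at hmk; exact absurd hmk (by simp)
      have e1 : d.items.map (fun q => (q.1, pvPick st r q)) =
          d.items.map (fun q => (q.1, pvPick st (p :: r) q)) := by
        apply List.map_congr_left
        intro q hq
        rw [pv_pick_skip st p r q (hnotkey q hq)]
      have e2 : pvPick st r (p.1, pvNew st p) = pvNew st p := pv_pick_none st r _ hp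
      rw [hfill, List.map_append, e1, List.append_assoc]
      congr 1
      simp [e2]

-- find? over a list with distinct keys locates a member's entry
theorem pv_find_of_mem (l : List (String × List String)) (k : String) (v : List String)
    (hnd : (l.map Prod.fst).Nodup) (hm : (k, v) ∈ l) :
    l.find? (fun q => q.1 == k) = some (k, v) := by
  induction l with
  | nil => simp at hm
  | cons p r ih =>
    simp only [List.map_cons, List.nodup_cons] at hnd
    obtain ⟨hp, hr⟩ := hnd
    rcases List.mem_cons.mp hm with h | h
    · subst h; simp [List.find?]
    · have hne : (p.1 == k) = false := by
        simp only [beq_eq_false_iff_ne]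
        intro he; exact hp (he ▸ List.mem_map_of_mem h)
      simp only [List.find?, hne]
      exact ih hr h

-- pvPick over the update's items is exactly B's value function on a key of the base dict
theorem pv_pick_eq_valB (st u : PySem.Dict String (List String)) (p : String × List String)
    (hnd : u.keys.Nodup) (hst : st.keys.Nodup) (hmem : p ∈ st.items) :
    pvPick st u.items p = pvValB st u p.1 := by
  by_cases hc : u.contains p.1 = true
  · have hsome : (u.get? p.1).isSome := by rw [← PySem.Dict.contains_eq_isSome_get?, hc]
    obtain ⟨v, hv⟩ := Option.isSome_iff_exists.mp hsome
    have hmi : (p.1, v) ∈ u.items := PySem.Dict.mem_items_of_get?_eq_some u hv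
    have hgd : u.getD p.1 [] = v := PySem.Dict.getD_of_get?_eq_some u [] hv
    have hfind : u.items.find? (fun q => q.1 == p.1) = some (p.1, v) :=
      pv_find_of_mem _ _ _ (by simpa [PySem.Dict.keys] using hnd) hmi
    simp [pvPick, pvValB, hfind, hc, hgd]
  · have hc' : u.contains p.1 = false := by simpa using hc
    have hnk : p.1 ∉ u.keys := by
      intro h
      rw [← PySem.Dict.contains_iff_mem_keys] at h
      rw [hc'] at h; exact absurd h (by simp)
    have hnm : p.1 ∉ u.items.map Prod.fst := by simpa [PySem.Dict.keys] using hnk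
    rw [pv_pick_none st _ _ hnm]
    have hmem' : (p.1, p.2) ∈ st.items := by simpa using hmem
    have hval : st.getD p.1 [] = p.2 := PySem.Dict.getD_of_mem_items st hmem' hst []
    simp [pvValB, hc', hval]

-- ===== VERDICT (by name: the statement is the Claim_ definition above) =====
theorem apply_update_py_spec : Claim_equal_apply_update_py := by
  intro state update _
  unfold Spec_apply_update_py
  simp only [apply_update_py, apply_update_py_alt]
  set st := PySem.Dict.ofList state with hst
  set u := PySem.Dict.ofList update with hu
  have hndu : u.keys.Nodup := PySem.Dict.nodup_keys_ofList update
  have hnds : st.keys.Nodup := PySem.Dict.nodup_keys_ofList state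
  rw [pv_main st st u.items (by simpa [PySem.Dict.keys] using hndu) hnds]
  rw [List.map_append]
  congr 1
  · -- state part: st.items rewritten by pvPick = st.keys mapped through pvValB
    have hk : st.keys.map (fun k => (k, pvValB st u k)) =
        st.items.map (fun p => (p.1, pvValB st u p.1)) := by
      simp only [PySem.Dict.keys, List.map_map]; rfl
    rw [hk]
    apply List.map_congr_left
    intro p hp
    rw [pv_pick_eq_valB st u p hndu hnds hp]
  · -- fresh part: fresh update items = update-only keys mapped through pvValB
    have h1 : u.keys.filter (fun k => !(st.contains k)) =
        (u.items.filter (fun q => !(st.contains q.1))).map Prod.fst := by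
      simp only [PySem.Dict.keys]
      rw [List.filter_map]
      rfl
    rw [h1, List.map_map]
    apply List.map_congr_left
    intro q hq
    have hqmem : q ∈ u.items := List.mem_of_mem_filter hq
    have hqc : u.contains q.1 = true :=
      (PySem.Dict.contains_iff_mem_keys u q.1).mpr (PySem.Dict.mem_keys_of_mem_items u hqmem)
    have hqmem' : (q.1, q.2) ∈ u.items := by simpa using hqmem
    have hgd : u.getD q.1 [] = q.2 := PySem.Dict.getD_of_mem_items u hqmem' hndu []
    simp only [Function.comp]
    by_cases hm : q.1 = "messages"
    · rw [hm] at hqc hgd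
      simp [pvNew, pvValB, hqc, hgd, hm]
    · simp [pvNew, pvValB, hqc, hgd, hm]
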